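-- pv_equiv track=rewrite | github.com/Moxin1044/qsnctf-python | qsnctf/crypto.py | bacon_encrypt
-- ===== SOURCE A (Python) =====
-- def bacon_encrypt(string):
--     # 培根密码加密
--     bacon = {'A': 'AAAAA', 'B': 'AAAAB', 'C': 'AAABA', 'D': 'AAABB',
--              'E': 'AABAA', 'F': 'AABAB', 'G': 'AABBA', 'H': 'AABBB',
--              'I': 'ABAAA', 'J': 'ABAAB', 'K': 'ABABA', 'L': 'ABABB',
--              'M': 'ABBAA', 'N': 'ABBAB', 'O': 'ABBBA', 'P': 'ABBBB',
--              'Q': 'BAAAA', 'R': 'BAAAB', 'S': 'BAABA', 'T': 'BAABB',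
--              'U': 'BABAA', 'V': 'BABAB', 'W': 'BABBA', 'X': 'BABBB',
--              'Y': 'BBAAA', 'Z': 'BBAAB', 'a': 'AAAAA', 'b': 'AAAAB',
--              'c': 'AAABA', 'd': 'AAABB', 'e': 'AABAA', 'f': 'AABAB',
--              'g': 'AABBA', 'h': 'AABBB', 'i': 'ABAAA', 'j': 'ABAAB',
--              'k': 'ABABA', 'l': 'ABABB', 'm': 'ABBAA', 'n': 'ABBAB',
--              'o': 'ABBBA', 'p': 'ABBBB', 'q': 'BAAAA', 'r': 'BAAAB',
--              's': 'BAABA', 't': 'BAABB', 'u': 'BABAA', 'v': 'BABAB',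
--              'w': 'BABBA', 'x': 'BABBB', 'y': 'BBAAA', 'z': 'BBAAB'}
--     encoded_string = ''
--     for char in string:
--         char = char.upper()
--         if char in bacon:
--             encoded_string += bacon[char]
--     return encoded_string
-- ===== SOURCE B (Python) =====
-- def bacon_encrypt(string):
--     # Each Bacon code is the 5-bit binary of the letter's alphabet index
--     # (bit -> 'A'/'B'), so no lookup table is needed.
--     parts = []
--     for char in string:
--         up = char.upper()
--         if len(up) == 1 and 'A' <= up <= 'Z':
--             idx = ord(up) - 65
--             parts.append(''.join('B' if (idx >> k) & 1 else 'A' for k in range(4, -1, -1)))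
--     return ''.join(parts)
-- ===== Notes on version B (the rewrite author's own statement) =====
-- stated objective: simpler
-- what changed: Replaces the 52-entry lookup dictionary with the closed form: each Bacon code is the 5-bit binary expansion of the letter's alphabet index, bits rendered as the two code letters.
import Mathlib
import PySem

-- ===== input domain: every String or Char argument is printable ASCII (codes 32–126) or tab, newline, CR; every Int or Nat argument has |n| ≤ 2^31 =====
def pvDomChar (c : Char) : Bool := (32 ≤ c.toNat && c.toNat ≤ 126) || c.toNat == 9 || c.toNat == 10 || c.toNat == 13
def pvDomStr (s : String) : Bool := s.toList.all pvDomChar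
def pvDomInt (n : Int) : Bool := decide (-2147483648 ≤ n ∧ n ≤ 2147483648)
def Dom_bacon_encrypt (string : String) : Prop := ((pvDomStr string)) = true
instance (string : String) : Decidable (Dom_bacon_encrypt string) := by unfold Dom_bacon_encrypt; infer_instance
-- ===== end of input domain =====

-- B replaces A's 52-entry lookup table by the closed form: each Bacon code is the
-- 5-bit binary of the letter's alphabet index, bits rendered as 'A'/'B'.

-- ===== PORT A =====
-- A's literal dictionary, keyed by one-character strings, insertion order preserved.
def baconDictA : PySem.Dict String String := PySem.Dict.ofList [
  ("A", "AAAAA"), ("B", "AAAAB"), ("C", "AAABA"), ("D", "AAABB"),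
  ("E", "AABAA"), ("F", "AABAB"), ("G", "AABBA"), ("H", "AABBB"),
  ("I", "ABAAA"), ("J", "ABAAB"), ("K", "ABABA"), ("L", "ABABB"),
  ("M", "ABBAA"), ("N", "ABBAB"), ("O", "ABBBA"), ("P", "ABBBB"),
  ("Q", "BAAAA"), ("R", "BAAAB"), ("S", "BAABA"), ("T", "BAABB"),
  ("U", "BABAA"), ("V", "BABAB"), ("W", "BABBA"), ("X", "BABBB"),
  ("Y", "BBAAA"), ("Z", "BBAAB"),
  ("a", "AAAAA"), ("b", "AAAAB"), ("c", "AAABA"), ("d", "AAABB"),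
  ("e", "AABAA"), ("f", "AABAB"), ("g", "AABBA"), ("h", "AABBB"),
  ("i", "ABAAA"), ("j", "ABAAB"), ("k", "ABABA"), ("l", "ABABB"),
  ("m", "ABBAA"), ("n", "ABBAB"), ("o", "ABBBA"), ("p", "ABBBB"),
  ("q", "BAAAA"), ("r", "BAAAB"), ("s", "BAABA"), ("t", "BAABB"),
  ("u", "BABAA"), ("v", "BABAB"), ("w", "BABBA"), ("x", "BABBB"),
  ("y", "BBAAA"), ("z", "BBAAB")]

-- the loop: char = char.upper(); if char in bacon: encoded += bacon[char]
def bacon_encrypt (string : String) : String :=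
  String.mk (string.toList.foldl (fun acc c =>
    let ch := String.mk (PySem.Chars.upper [c])
    if baconDictA.contains ch then acc ++ (baconDictA.getD ch "").toList else acc) [])

-- ===== PORT B =====
-- ''.join('B' if (idx >> k) & 1 else 'A' for k in range(4, -1, -1))
def baconCodeB (idx : Nat) : List Char :=
  (PySem.List.pyRange 4 (-1) (-1)).map (fun k => if (idx >>> k.toNat) % 2 = 1 then 'B' else 'A')

def bacon_encrypt_alt (string : String) : String :=
  String.mk (string.toList.foldl (fun parts c =>
    match PySem.Chars.upper [c] with
    | [u] => if 'A' ≤ u ∧ u ≤ 'Z' then parts ++ baconCodeB (u.toNat - 65) else parts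
    | _ => parts) [])

-- ===== PRECONDITION & SPEC =====
def Spec_bacon_encrypt (string : String) (out : String) : Prop := out = bacon_encrypt_alt string
instance (string : String) (out : String) : Decidable (Spec_bacon_encrypt string out) := by unfold Spec_bacon_encrypt; infer_instance

-- ===== CLAIM (what is proved, stated in full; the proofs are below) =====
def Claim_equal_bacon_encrypt : Prop := ∀ (string : String), Dom_bacon_encrypt string → Spec_bacon_encrypt string (bacon_encrypt string)

-- ===== LEMMAS AND PROOFS =====

-- the chunk each side appends for one character
def stepA (c : Char) : List Char :=
  let ch := String.mk (PySem.Chars.upper [c])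
  if baconDictA.contains ch then (baconDictA.getD ch "").toList else []

def stepB (c : Char) : List Char :=
  match PySem.Chars.upper [c] with
  | [u] => if 'A' ≤ u ∧ u ≤ 'Z' then baconCodeB (u.toNat - 65) else []
  | _ => []

lemma step_eq_of_dom (c : Char) (h : pvDomChar c = true) : stepA c = stepB c := by
  have hlt : c.toNat < 128 := by
    simp [pvDomChar] at h; omega
  have key : ∀ n ∈ List.range 128, stepA (Char.ofNat n) = stepB (Char.ofNat n) := by
    set_option maxRecDepth 10000 in decide
  have := key c.toNat (List.mem_range.mpr hlt)
  simpa [Char.ofNat_toNat] using this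

lemma foldl_step (f : List Char → Char → List Char) (g : Char → List Char)
    (hf : ∀ acc c, f acc c = acc ++ g c) :
    ∀ (l : List Char) (acc : List Char), l.foldl f acc = acc ++ (l.map g).flatten := by
  intro l
  induction l with
  | nil => intro acc; simp [List.foldl]
  | cons c t ih => intro acc; simp [List.foldl, hf, ih, List.append_assoc]

-- ===== VERDICT (by name: the statement is the Claim_ definition above) =====
theorem bacon_encrypt_spec : Claim_equal_bacon_encrypt := by
  intro s hdom
  unfold Spec_bacon_encrypt bacon_encrypt bacon_encrypt_alt
  have hA := foldl_step (fun acc c =>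
      let ch := String.mk (PySem.Chars.upper [c])
      if baconDictA.contains ch then acc ++ (baconDictA.getD ch "").toList else acc) stepA (by
    intro acc c
    simp only [stepA]
    split <;> simp) s.toList []
  have hB := foldl_step (fun parts c =>
      match PySem.Chars.upper [c] with
      | [u] => if 'A' ≤ u ∧ u ≤ 'Z' then parts ++ baconCodeB (u.toNat - 65) else parts
      | _ => parts) stepB (by
    intro acc c
    simp only [stepB]
    rcases hu : PySem.Chars.upper [c] with _ | ⟨u, _ | ⟨v, t⟩⟩ <;> simp only [hu, List.nil_append] <;> [skip; split <;> simp; skip] <;> simp) s.toList []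
  rw [hA, hB]
  have hall : ∀ c ∈ s.toList, pvDomChar c = true := by
    simpa [Dom_bacon_encrypt, pvDomStr, List.all_eq_true] using hdom
  exact congrArg String.mk (congrArg (fun l => [] ++ List.flatten l)
    (List.map_congr_left (fun c hc => step_eq_of_dom c (hall c hc))))
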